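-- pv_equiv track=rewrite | github.com/boffomarco/InternshipCode | RapidMinerCode/knowledgeConverter/knowledgeConverter.py | checkSub
-- ===== SOURCE A (Python) =====
-- def checkSub(names, rNames, subsAdded, namesRemaining):
--     bool_ = False
--     # Split Names and rNames in the different name and rName of relative composition
--     nameL = names.split("_-_")
--     rNameL = rNames.split("_-_")
--     # Count the number of rName found in rNames
--     i = 0
--     for name in nameL:
--         for rName in rNameL:
--             if(name == rName):
--                 i+=1
--     # If the result of i is equal to the number of rName(all elements of rNames are on Names) and there isn't already a bigger subClass
--     if(i==len(rNameL) and checkBiggerSub(rNameL, subsAdded)):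
--         # Set the boolean to true and add rNames as subClass of Names
--         bool_ = True
--         # Add rNames at the subClasses of Names
--         subsAdded.add(rNames)
--         # Remove the components of rNames from the components remaining
--         for rName in rNameL:
--             if(rName in namesRemaining):
--                 namesRemaining.remove(rName)
--     # Return the bool and the modified sets
--     return bool_, subsAdded, namesRemaining
--
-- def checkBiggerSub(rNameL, subsAdded):
--     # Iterate over every already added subClasses of Names
--     for subj in subsAdded:
--         # Count the number of rName found in subj
--         i = 0
--         for s in subj.split("_-_"):
--             for rName in rNameL:
--                 if(s == rName):
--                     i+=1
--         # If the result of i is equal to the number of rName(all elements of rNames are on an already added subClass of Names)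
--         if(i == len(rNameL)):
--             # Return False since a bigger subClass has already been added to Names
--             return False
--     # Return True since there aren't subClasses of Names that covers all these components of Names
--     return True
-- ===== SOURCE B (Python) =====
-- # B: one-pass counter-based reimplementation. Like A it adds to subsAdded in place,
-- # but it returns a fresh filtered namesRemaining instead of repeated .remove calls;
-- # the equivalence is about the return value.
-- def checkSub(names, rNames, subsAdded, namesRemaining):
--     rNameL = rNames.split("_-_")
--     # multiplicity of each component of rNames
--     cr = {}
--     for r in rNameL:
--         cr[r] = cr.get(r, 0) + 1
--     # i = number of (name, rName) matching pairs, via lookups instead of a nested scan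
--     i = 0
--     for name in names.split("_-_"):
--         i += cr.get(name, 0)
--     if i != len(rNameL) or not _noBiggerSub(cr, len(rNameL), subsAdded):
--         return False, subsAdded, namesRemaining
--     subsAdded.add(rNames)
--     # drop, for each component, its first cr[x] occurrences — one pass
--     need = dict(cr)
--     kept = []
--     for x in namesRemaining:
--         if need.get(x, 0) > 0:
--             need[x] = need[x] - 1
--         else:
--             kept.append(x)
--     return True, subsAdded, type(namesRemaining)(kept)
--
-- def _noBiggerSub(cr, nR, subsAdded):
--     for subj in subsAdded:
--         t = 0
--         for s in subj.split("_-_"):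
--             t += cr.get(s, 0)
--         if t == nR:
--             return False
--     return True
-- ===== Notes on version B (the rewrite author's own statement) =====
-- stated objective: alternative
-- what changed: Replaces the nested name-by-rName comparison loops (in checkSub and checkBiggerSub) with a multiplicity dict of rNames' components summed by lookup, and replaces the repeated list.remove loop over rNameL with a single counter-driven filtering pass over namesRemaining.
import Mathlib
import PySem

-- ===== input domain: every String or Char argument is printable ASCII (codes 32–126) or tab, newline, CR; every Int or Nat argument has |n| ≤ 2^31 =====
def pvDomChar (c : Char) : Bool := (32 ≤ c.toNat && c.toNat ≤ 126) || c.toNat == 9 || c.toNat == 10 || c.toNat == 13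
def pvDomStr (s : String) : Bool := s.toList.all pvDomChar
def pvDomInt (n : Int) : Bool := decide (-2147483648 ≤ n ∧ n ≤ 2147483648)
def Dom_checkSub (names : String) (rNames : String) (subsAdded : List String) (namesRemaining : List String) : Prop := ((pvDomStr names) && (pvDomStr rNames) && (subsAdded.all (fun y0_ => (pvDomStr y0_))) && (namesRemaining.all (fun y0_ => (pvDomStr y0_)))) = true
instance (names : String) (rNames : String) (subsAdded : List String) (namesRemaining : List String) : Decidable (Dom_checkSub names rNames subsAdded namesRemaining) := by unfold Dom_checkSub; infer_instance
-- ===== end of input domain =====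

-- B replaces A's nested comparison loops by a counter of rNames' components (sums of
-- lookups) and A's repeated list.remove loop by one counter-driven filtering pass.
-- Python A mutates subsAdded/namesRemaining in place; B adds to subsAdded but returns a fresh
-- filtered namesRemaining; the theorem is about the return value only.

-- ===== PORT A =====
-- s.split("_-_"): sep is the non-empty literal, so Python never raises and split? is some
def pvSplit (s : String) : List String := (PySem.Str.split? s "_-_").getD []

def pvCheckBiggerSub (rNameL : List String) : List String → Bool
  | [] => true
  | subj :: rest =>
      let i : Int := (pvSplit subj).foldl
        (fun i s => rNameL.foldl (fun i rName => if s == rName then i + 1 else i) i) 0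
      if i == (rNameL.length : Int) then false else pvCheckBiggerSub rNameL rest

def checkSub (names : String) (rNames : String) (subsAdded : List String) (namesRemaining : List String) : Bool × List String × List String :=
  let nameL := pvSplit names
  let rNameL := pvSplit rNames
  let i : Int := nameL.foldl
    (fun i name => rNameL.foldl (fun i rName => if name == rName then i + 1 else i) i) 0
  if i == (rNameL.length : Int) && pvCheckBiggerSub rNameL subsAdded then
    let subsAdded' := PySem.Set.add subsAdded rNames
    let namesRemaining' := rNameL.foldl
      (fun nr rName => if nr.contains rName then (PySem.List.remove? nr rName).getD nr else nr)
      namesRemaining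
    (true, subsAdded', namesRemaining')
  else
    (false, subsAdded, namesRemaining)

-- ===== PORT B =====
def pvNoBiggerSub (cr : PySem.Dict String Int) (nR : Int) : List String → Bool
  | [] => true
  | subj :: rest =>
      let t : Int := (pvSplit subj).foldl (fun t s => t + cr.getD s 0) 0
      if t == nR then false else pvNoBiggerSub cr nR rest

def pvKeepPass : PySem.Dict String Int → List String → List String
  | _, [] => []
  | need, x :: xs =>
      if need.getD x 0 > 0 then pvKeepPass (need.insert x (need.getD x 0 - 1)) xs
      else x :: pvKeepPass need xs

def checkSub_alt (names : String) (rNames : String) (subsAdded : List String) (namesRemaining : List String) : Bool × List String × List String :=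
  let rNameL := pvSplit rNames
  let cr := rNameL.foldl (fun d r => d.insert r (d.getD r 0 + 1)) PySem.Dict.empty
  let i : Int := (pvSplit names).foldl (fun acc name => acc + cr.getD name 0) 0
  if !(i == (rNameL.length : Int)) || !(pvNoBiggerSub cr (rNameL.length : Int) subsAdded) then
    (false, subsAdded, namesRemaining)
  else
    (true, PySem.Set.add subsAdded rNames, pvKeepPass cr namesRemaining)

-- ===== PRECONDITION & SPEC =====
def Spec_checkSub (names : String) (rNames : String) (subsAdded : List String) (namesRemaining : List String) (out : Bool × List String × List String) : Prop := out = checkSub_alt names rNames subsAdded namesRemaining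
instance (names : String) (rNames : String) (subsAdded : List String) (namesRemaining : List String) (out : Bool × List String × List String) : Decidable (Spec_checkSub names rNames subsAdded namesRemaining out) := by unfold Spec_checkSub; infer_instance

-- ===== CLAIM (what is proved, stated in full; the proofs are below) =====
def Claim_equal_checkSub : Prop := ∀ (names : String) (rNames : String) (subsAdded : List String) (namesRemaining : List String), Dom_checkSub names rNames subsAdded namesRemaining → Spec_checkSub names rNames subsAdded namesRemaining (checkSub names rNames subsAdded namesRemaining)

-- ===== LEMMAS AND PROOFS =====

-- inner comparison loop of A is a count
theorem pv_inner_count (rNameL : List String) (s : String) (i0 : Int) :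
    rNameL.foldl (fun i rName => if s == rName then i + 1 else i) i0
      = i0 + (rNameL.count s : Int) := by
  induction rNameL generalizing i0 with
  | nil => simp
  | cons r rs ih =>
      simp only [List.foldl_cons, ih, List.count_cons]
      by_cases h : s = r
      · simp [h]; ring
      · simp [h, Ne.symm h]

-- the counter built by B
theorem pv_cr_getD (rNameL : List String) (v : String) :
    (rNameL.foldl (fun d r => d.insert r (d.getD r 0 + 1)) PySem.Dict.empty).getD v 0
      = (rNameL.count v : Int) := by
  rw [PySem.Dict.foldl_insert_getD_add_one_eq_counter, PySem.Dict.getD_counter]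

-- the two i-sums agree
theorem pv_sum_eq (nameL rNameL : List String) (i0 : Int) :
    nameL.foldl (fun i name => rNameL.foldl (fun i rName => if name == rName then i + 1 else i) i) i0
      = nameL.foldl (fun acc name =>
          acc + (rNameL.foldl (fun d r => d.insert r (d.getD r 0 + 1)) PySem.Dict.empty).getD name 0) i0 := by
  induction nameL generalizing i0 with
  | nil => rfl
  | cons n ns ih => simp only [List.foldl_cons, pv_inner_count, pv_cr_getD]

theorem pv_bigger_eq (rNameL subs : List String) :
    pvCheckBiggerSub rNameL subs
      = pvNoBiggerSub (rNameL.foldl (fun d r => d.insert r (d.getD r 0 + 1)) PySem.Dict.empty)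
          (rNameL.length : Int) subs := by
  induction subs with
  | nil => rfl
  | cons subj rest ih =>
      simp only [pvCheckBiggerSub, pvNoBiggerSub, ih]
      have h : ((pvSplit subj).foldl
          (fun i s => rNameL.foldl (fun i rName => if s == rName then i + 1 else i) i) (0 : Int))
          = (pvSplit subj).foldl (fun t s =>
              t + (rNameL.foldl (fun d r => d.insert r (d.getD r 0 + 1)) PySem.Dict.empty).getD s 0) 0 := by
        have := pv_sum_eq (pvSplit subj) rNameL 0
        simpa using this
      rw [h]

-- functional model of B's filtering pass
def pvFilterF (need : String → Int) : List String → List String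
  | [] => []
  | x :: xs =>
      if need x > 0 then pvFilterF (Function.update need x (need x - 1)) xs
      else x :: pvFilterF need xs

theorem pvKeepPass_eq_filterF (xs : List String) (d : PySem.Dict String Int) :
    pvKeepPass d xs = pvFilterF (fun y => d.getD y 0) xs := by
  induction xs generalizing d with
  | nil => rfl
  | cons x xs ih =>
      simp only [pvKeepPass, pvFilterF]
      by_cases h : d.getD x 0 > 0
      · simp only [h, if_pos]
        rw [ih]
        congr 1
        funext y
        rw [PySem.Dict.getD_insert]
        by_cases hy : y = x <;> simp [hy, Function.update]
      · simp [h, ih]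

theorem pvFilterF_congr (xs : List String) (f g : String → Int)
    (h : ∀ x ∈ xs, f x = g x) : pvFilterF f xs = pvFilterF g xs := by
  induction xs generalizing f g with
  | nil => rfl
  | cons x xs ih =>
      simp only [pvFilterF, h x (by simp)]
      by_cases hx : g x > 0
      · simp only [hx, if_pos]
        apply ih
        intro y hy
        by_cases hyx : y = x <;> simp [hyx, Function.update, h y (by simp [hy])]
      · simp only [hx, if_neg, not_false_iff]
        rw [ih _ _ (fun y hy => h y (by simp [hy]))]

theorem pvFilterF_bump (nr : List String) (need : String → Int)
    (hpos : ∀ x, 0 ≤ need x) (r : String) :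
    pvFilterF (Function.update need r (need r + 1)) nr
      = pvFilterF need (if r ∈ nr then nr.erase r else nr) := by
  induction nr generalizing need with
  | nil => simp [pvFilterF]
  | cons x tl ih =>
      by_cases hx : x = r
      · subst hx
        have h1 : Function.update need x (need x + 1) x = need x + 1 := by simp
        simp only [pvFilterF, h1]
        have hgt : need x + 1 > 0 := by have := hpos x; omega
        rw [if_pos hgt, Function.update_idem]
        have h2 : Function.update need x (need x + 1 - 1) = need := by
          have h3 : need x + 1 - 1 = need x := by ring
          rw [h3, Function.update_eq_self]
        rw [h2, if_pos (List.mem_cons_self), List.erase_cons_head]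
      · have hxr : Function.update need r (need r + 1) x = need x := by
          simp [Function.update, hx]
        have hmem : r ∈ x :: tl ↔ r ∈ tl := by
          simp [List.mem_cons, Ne.symm hx]
        have herase : (x :: tl).erase r = x :: tl.erase r :=
          List.erase_cons_tail (by simp [hx])
        by_cases hnx : need x > 0
        · simp only [pvFilterF, hxr, hnx, if_pos]
          have hcomm : Function.update (Function.update need r (need r + 1)) x (need x - 1)
              = Function.update (Function.update need x (need x - 1)) r
                  ((Function.update need x (need x - 1)) r + 1) := by
            have h2 : (Function.update need x (need x - 1)) r = need r := by
              simp [Function.update, Ne.symm hx]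
            rw [h2, Function.update_comm hx]
          have hpos' : ∀ y, 0 ≤ Function.update need x (need x - 1) y := by
            intro y
            by_cases hy : y = x
            · subst hy; simp; omega
            · simp [Function.update, hy]; exact hpos y
          rw [hcomm, ih _ hpos']
          by_cases hr : r ∈ tl
          · rw [if_pos hr, if_pos (hmem.mpr hr), herase]
            simp [pvFilterF, hnx]
          · rw [if_neg hr, if_neg (fun hc => hr (hmem.mp hc))]
            simp [pvFilterF, hnx]
        · simp only [pvFilterF, hxr, hnx, if_neg, not_false_iff]
          rw [ih need hpos]
          by_cases hr : r ∈ tl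
          · rw [if_pos hr, if_pos (hmem.mpr hr), herase]
            simp [pvFilterF, hnx]
          · rw [if_neg hr, if_neg (fun hc => hr (hmem.mp hc))]
            simp [pvFilterF, hnx]

theorem pv_remove_eq (rs : List String) (nr : List String) :
    rs.foldl (fun nr rName => if nr.contains rName then (PySem.List.remove? nr rName).getD nr else nr) nr
      = pvFilterF (fun x => (rs.count x : Int)) nr := by
  induction rs generalizing nr with
  | nil =>
      simp only [List.foldl_nil]
      have h0 : (fun x : String => ((([]:List String).count x : Int))) = fun _ => (0:Int) := by
        funext x; simp
      rw [h0]
      induction nr with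
      | nil => rfl
      | cons x xs ih => rw [pvFilterF]; simpa using ih
  | cons r rs ih =>
      simp only [List.foldl_cons]
      rw [ih]
      have hstep : (if nr.contains r then (PySem.List.remove? nr r).getD nr else nr)
          = (if r ∈ nr then nr.erase r else nr) := by
        by_cases h : r ∈ nr
        · rw [if_pos (by simpa using h), if_pos h, PySem.List.remove?_eq_some_erase nr r h]; rfl
        · rw [if_neg (by simpa using h), if_neg h]
      rw [hstep]
      have hfun : (fun x => ((r :: rs).count x : Int))
          = Function.update (fun x => (rs.count x : Int)) r ((rs.count r : Int) + 1) := by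
        funext x
        by_cases hx : x = r
        · simp [Function.update, hx]
        · simp [Function.update, hx, Ne.symm hx]
      rw [hfun, pvFilterF_bump nr _ (fun x => Int.natCast_nonneg (List.count x rs)) r]

theorem pv_keep_eq (rNameL nr : List String) :
    rNameL.foldl (fun nr rName => if nr.contains rName then (PySem.List.remove? nr rName).getD nr else nr) nr
      = pvKeepPass (rNameL.foldl (fun d r => d.insert r (d.getD r 0 + 1)) PySem.Dict.empty) nr := by
  rw [pv_remove_eq, pvKeepPass_eq_filterF]
  exact pvFilterF_congr nr _ _ (fun x _ => (pv_cr_getD rNameL x).symm)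

-- ===== VERDICT (by name: the statement is the Claim_ definition above) =====
theorem checkSub_spec : Claim_equal_checkSub := by
  intro names rNames subsAdded namesRemaining _
  unfold Spec_checkSub checkSub checkSub_alt
  simp only []
  rw [pv_sum_eq, pv_bigger_eq, pv_keep_eq]
  set cr : PySem.Dict String Int := (pvSplit rNames).foldl (fun d r => d.insert r (d.getD r 0 + 1)) PySem.Dict.empty with hcr
  set i := (pvSplit names).foldl (fun acc name => acc + cr.getD name 0) (0 : Int) with hi
  by_cases h1 : i == ((pvSplit rNames).length : Int)
  · by_cases h2 : pvNoBiggerSub cr ((pvSplit rNames).length : Int) subsAdded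
      <;> simp [h1, h2]
  · simp [h1]
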